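-- pv_equiv track=rewrite | github.com/osick/repo-ctx | repo_ctx/analysis/smalltalk/fileout_parser.py | _split_chunks
-- ===== SOURCE A (Python) =====
-- from typing import Iterator
--
-- def _split_chunks(code: str) -> Iterator[tuple[str, int]]:
--     """
--     Split code into chunks delimited by `!`.
--
--     Handles:
--     - `!` as chunk delimiter
--     - `!!` as escaped `!` within strings
--     - Empty chunks between `! !`
--
--     Yields:
--         Tuples of (chunk_content, line_number)
--     """
--     # Replace escaped !! with placeholder
--     placeholder = "\x00BANG\x00"
--     code = code.replace("!!", placeholder)
--
--     line_number = 1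
--     current_chunk = []
--     chunk_start_line = 1
--
--     i = 0
--     while i < len(code):
--         char = code[i]
--
--         if char == "!":
--             # End of chunk
--             chunk_content = "".join(current_chunk).strip()
--             if chunk_content:
--                 # Restore escaped bangs
--                 chunk_content = chunk_content.replace(placeholder, "!")
--                 yield (chunk_content, chunk_start_line)
--
--             current_chunk = []
--             chunk_start_line = line_number + 1
--         else:
--             current_chunk.append(char)
--             if char == "\n":
--                 line_number += 1
--
--         i += 1
--
--     # Handle final chunk if no trailing !
--     final_chunk = "".join(current_chunk).strip()
--     if final_chunk:
--         final_chunk = final_chunk.replace(placeholder, "!")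
--         yield (final_chunk, chunk_start_line)
-- ===== SOURCE B (Python) =====
-- from typing import Iterator
--
-- def _split_chunks(code: str) -> Iterator[tuple[str, int]]:
--     """Split code into bang-delimited chunks, bang-split segments processed whole instead of char by char."""
--     placeholder = "\x00BANG\x00"
--     line = 1
--     start = 1
--     for segment in code.replace("!!", placeholder).split("!"):
--         stripped = segment.strip()
--         if stripped:
--             yield (stripped.replace(placeholder, "!"), start)
--         line += segment.count("\n")
--         start = line + 1
-- ===== Notes on version B (the rewrite author's own statement) =====
-- stated objective: faster
-- what changed: Replaces the per-character index loop with manual chunk accumulation by one str.split on the bang delimiter followed by a per-segment pass that counts newlines per segment to derive the start lines.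
import Mathlib
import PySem

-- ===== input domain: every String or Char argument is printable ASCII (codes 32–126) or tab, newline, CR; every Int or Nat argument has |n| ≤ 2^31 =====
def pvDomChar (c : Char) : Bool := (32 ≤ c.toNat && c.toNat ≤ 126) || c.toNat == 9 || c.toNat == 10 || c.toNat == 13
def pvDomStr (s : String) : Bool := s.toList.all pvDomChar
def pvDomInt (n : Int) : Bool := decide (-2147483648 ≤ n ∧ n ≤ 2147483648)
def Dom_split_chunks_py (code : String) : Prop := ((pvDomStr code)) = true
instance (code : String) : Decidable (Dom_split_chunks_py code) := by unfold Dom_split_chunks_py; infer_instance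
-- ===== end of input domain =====

-- B replaces A's per-character accumulation loop by str.split('!') plus a per-segment pass
-- that counts newlines per segment (same O(n), measurably faster by avoiding per-char appends).


-- the escaped-bang placeholder "\x00BANG\x00" used by both Pythons
def pvPlaceholder : String := "\x00BANG\x00"

-- ===== PORT A =====
-- A's while-loop over the characters: state (line_number, current_chunk, chunk_start_line)
def pvALoop : List Char → Int → List Char → Int → List (String × Int)
  | [], _line, cur, start =>
    -- final chunk after the loop
    let fc := PySem.Chars.strip cur
    if fc ≠ [] then
      [(String.ofList (PySem.Chars.replace fc pvPlaceholder.toList ['!']), start)]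
    else []
  | ch :: rest, line, cur, start =>
    if ch = '!' then
      let cc := PySem.Chars.strip cur
      (if cc ≠ [] then
        [(String.ofList (PySem.Chars.replace cc pvPlaceholder.toList ['!']), start)]
      else []) ++ pvALoop rest line [] (line + 1)
    else
      pvALoop rest (if ch = '\n' then line + 1 else line) (cur ++ [ch]) start

def split_chunks_py (code : String) : List (String × Int) :=
  pvALoop (PySem.Str.replace code "!!" pvPlaceholder).toList 1 [] 1

-- ===== PORT B =====
-- B's for-loop over the segments of code.split('!'): state (line, start)
def pvBLoop : List (List Char) → Int → Int → List (String × Int)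
  | [], _line, _start => []
  | seg :: rest, line, start =>
    let st := PySem.Chars.strip seg
    (if st ≠ [] then
      [(String.ofList (PySem.Chars.replace st pvPlaceholder.toList ['!']), start)]
    else []) ++
      pvBLoop rest (line + (PySem.Chars.count seg ['\n'] : Int))
        (line + (PySem.Chars.count seg ['\n'] : Int) + 1)

def split_chunks_py_alt (code : String) : List (String × Int) :=
  pvBLoop (PySem.Chars.splitOn (PySem.Str.replace code "!!" pvPlaceholder).toList ['!']) 1 1

-- ===== PRECONDITION & SPEC =====
def Spec_split_chunks_py (code : String) (out : List (String × Int)) : Prop := out = split_chunks_py_alt code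
instance (code : String) (out : List (String × Int)) : Decidable (Spec_split_chunks_py code out) := by unfold Spec_split_chunks_py; infer_instance

-- ===== CLAIM (what is proved, stated in full; the proofs are below) =====
def Claim_equal_split_chunks_py : Prop := ∀ (code : String), Dom_split_chunks_py code → Spec_split_chunks_py code (split_chunks_py code)

-- ===== LEMMAS AND PROOFS =====

-- structural characterisation of splitting on a single '!'
def pvSplit : List Char → List (List Char)
  | [] => [[]]
  | c :: cs =>
    if c = '!' then [] :: pvSplit cs
    else
      match pvSplit cs with
      | [] => [[c]]
      | h :: t => (c :: h) :: t

theorem pvSplit_ne_nil (cs : List Char) : pvSplit cs ≠ [] := by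
  cases cs with
  | nil => simp [pvSplit]
  | cons c cs => simp only [pvSplit]; split; · simp
                 · split <;> simp_all

theorem pvSplitOn_go_eq (fuel : Nat) (l cur : List Char) (acc : List (List Char))
    (h : l.length < fuel) :
    PySem.Chars.splitOn.go ['!'] fuel l cur acc =
      acc.reverse ++
        (match pvSplit l with
         | [] => []
         | h :: t => (cur.reverse ++ h) :: t) := by
  induction fuel generalizing l cur acc with
  | zero => omega
  | succ f ih =>
    cases l with
    | nil => simp [PySem.Chars.splitOn.go, pvSplit]
    | cons c rest =>
      rw [PySem.Chars.splitOn.go]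
      by_cases hc : c = '!'
      · subst hc
        have hp : List.isPrefixOf ['!'] ('!' :: rest) = true := by simp [List.isPrefixOf]
        rw [if_pos hp]
        rw [ih _ _ _ (by simpa using Nat.lt_of_succ_lt_succ h)]
        rcases hs : pvSplit rest with _ | ⟨hh, tt⟩
        · exact absurd hs (pvSplit_ne_nil _)
        · simp [pvSplit, hs]
      · have hbc : ('!' == c) = false := by
          simp only [beq_eq_false_iff_ne, ne_eq]
          intro hq; exact hc hq.symm
        have hp : List.isPrefixOf ['!'] (c :: rest) = false := by
          simp [List.isPrefixOf, hbc]
        rw [if_neg (by simp [hp])]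
        rw [ih _ _ _ (by simpa using Nat.lt_of_succ_lt_succ h)]
        rcases hs : pvSplit rest with _ | ⟨hh, tt⟩
        · exact absurd hs (pvSplit_ne_nil _)
        · simp [pvSplit, hs, hc]

theorem pvSplitOn_eq (cs : List Char) :
    PySem.Chars.splitOn cs ['!'] = pvSplit cs := by
  rw [PySem.Chars.splitOn, pvSplitOn_go_eq _ _ _ _ (by omega)]
  rcases hs : pvSplit cs with _ | ⟨hh, tt⟩
  · exact absurd hs (pvSplit_ne_nil _)
  · simp

theorem pvCount_cons (c : Char) (cs : List Char) :
    PySem.Chars.count (c :: cs) ['\n'] =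
      (if c = '\n' then 1 else 0) + PySem.Chars.count cs ['\n'] := by
  have goacc : ∀ (fuel : Nat) (l : List Char) (acc : Nat),
      PySem.Chars.count.go ['\n'] fuel l acc = acc + PySem.Chars.count.go ['\n'] fuel l 0 := by
    intro fuel
    induction fuel with
    | zero => intro l acc; simp [PySem.Chars.count.go]
    | succ f ih =>
      intro l acc
      cases l with
      | nil => simp [PySem.Chars.count.go]
      | cons c rest =>
        rw [PySem.Chars.count.go, PySem.Chars.count.go]
        split
        · rw [ih _ (acc + 1), ih _ (0 + 1)]; omega
        · rw [ih _ acc]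
  rw [PySem.Chars.count, PySem.Chars.count]
  simp only [List.isEmpty_cons, Bool.false_eq_true, if_false, List.length_cons]
  rw [PySem.Chars.count.go]
  by_cases hc : c = '\n'
  · subst hc
    rw [if_pos (by simp [List.isPrefixOf])]
    simp only [List.length, List.drop_succ_cons, List.drop_zero]
    rw [goacc]
    simp
  · have hbc : ('\n' == c) = false := by
      simp only [beq_eq_false_iff_ne, ne_eq]
      intro hq; exact hc hq.symm
    rw [if_neg (by simp [List.isPrefixOf, hbc])]
    simp [hc]

theorem pvMain (cs : List Char) (cur : List Char) (line start : Int) :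
    pvALoop cs line cur start =
      match pvSplit cs with
      | [] => []
      | h :: t =>
        (if PySem.Chars.strip (cur ++ h) ≠ [] then
          [(String.ofList (PySem.Chars.replace (PySem.Chars.strip (cur ++ h)) pvPlaceholder.toList ['!']), start)]
        else []) ++
          pvBLoop t (line + (PySem.Chars.count h ['\n'] : Int))
            (line + (PySem.Chars.count h ['\n'] : Int) + 1) := by
  induction cs generalizing cur line start with
  | nil => simp [pvALoop, pvSplit, pvBLoop]
  | cons c rest ih =>
    by_cases hc : c = '!'
    · subst hc
      rw [pvALoop, if_pos rfl, ih]
      rcases hs : pvSplit rest with _ | ⟨hh, tt⟩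
      · exact absurd hs (pvSplit_ne_nil _)
      · simp only [pvSplit, hs]
        simp [pvBLoop, show PySem.Chars.count [] ['\n'] = 0 from by decide]
    · rw [pvALoop, if_neg hc, ih]
      rcases hs : pvSplit rest with _ | ⟨hh, tt⟩
      · exact absurd hs (pvSplit_ne_nil _)
      · simp only [pvSplit, if_neg hc, hs]
        rw [pvCount_cons]
        simp only [List.append_assoc, List.singleton_append]
        by_cases hn : c = '\n'
        · simp only [hn, reduceIte, Nat.cast_add, Nat.cast_one]
          congr 2 <;> omega
        · simp only [hn, reduceIte]
          congr 2 <;> omega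

-- ===== VERDICT (by name: the statement is the Claim_ definition above) =====
theorem split_chunks_py_spec : Claim_equal_split_chunks_py := by
  intro code _
  unfold Spec_split_chunks_py split_chunks_py split_chunks_py_alt
  rw [pvSplitOn_eq, pvMain]
  rcases hs : pvSplit (PySem.Str.replace code "!!" pvPlaceholder).toList with _ | ⟨h, t⟩
  · exact absurd hs (pvSplit_ne_nil _)
  · simp [pvBLoop]
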